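-- pv_equiv track=rewrite | github.com/jmikk/prAPI | GachaCatchEmAll/GachaCatchEmAll.py | _pick_counter_types
-- ===== SOURCE A (Python) =====
-- from typing import Any, Dict, List, Optional, Tuple
--
-- TYPE_BEATS = {
--     "fire": ["grass","ice","bug","steel"],
--     "water": ["fire","ground","rock"],
--     "grass": ["water","ground","rock"],
--     "electric": ["water","flying"],
--     "ice": ["grass","ground","flying","dragon"],
--     "fighting": ["normal","ice","rock","dark","steel"],
--     "poison": ["grass","fairy"],
--     "ground": ["fire","electric","poison","rock","steel"],
--     "flying": ["grass","fighting","bug"],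
--     "psychic": ["fighting","poison"],
--     "bug": ["grass","psychic","dark"],
--     "rock": ["fire","ice","flying","bug"],
--     "ghost": ["psychic","ghost"],
--     "dragon": ["dragon"],
--     "dark": ["psychic","ghost"],
--     "steel": ["ice","rock","fairy"],
--     "fairy": ["fighting","dragon","dark"],
-- }
--
-- def _pick_counter_types(your_team: List[Dict[str, Any]]) -> List[str]:
--     # collect your visible types
--     yours = set()
--     for e in your_team:
--         for t in (e.get("types") or []):
--             yours.add(t.lower())
--     # score attacker types by how many of your types they beat
--     best = []
--     best_score = 0
--     for atk, beats in TYPE_BEATS.items():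
--         score = len(yours.intersection(set(beats)))
--         if score > best_score:
--             best, best_score = [atk], score
--         elif score == best_score and score > 0:
--             best.append(atk)
--     return best or []
-- ===== SOURCE B (Python) =====
-- from typing import Any, Dict, List
--
-- TYPE_BEATS = {
--     "fire": ["grass","ice","bug","steel"],
--     "water": ["fire","ground","rock"],
--     "grass": ["water","ground","rock"],
--     "electric": ["water","flying"],
--     "ice": ["grass","ground","flying","dragon"],
--     "fighting": ["normal","ice","rock","dark","steel"],
--     "poison": ["grass","fairy"],
--     "ground": ["fire","electric","poison","rock","steel"],
--     "flying": ["grass","fighting","bug"],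
--     "psychic": ["fighting","poison"],
--     "bug": ["grass","psychic","dark"],
--     "rock": ["fire","ice","flying","bug"],
--     "ghost": ["psychic","ghost"],
--     "dragon": ["dragon"],
--     "dark": ["psychic","ghost"],
--     "steel": ["ice","rock","fairy"],
--     "fairy": ["fighting","dragon","dark"],
-- }
--
-- # Reverse index: defender type -> list of attacker types that beat it.
-- BEATEN_BY: Dict[str, List[str]] = {}
-- for _atk, _beats in TYPE_BEATS.items():
--     for _d in _beats:
--         BEATEN_BY.setdefault(_d, []).append(_atk)
--
-- def _pick_counter_types(your_team: List[Dict[str, Any]]) -> List[str]: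
--     yours = {t.lower() for e in your_team for t in (e.get("types") or [])}
--     # count, per attacker, how many of our types it beats, via the reverse index
--     counts: Dict[str, int] = {}
--     for t in yours:
--         for atk in BEATEN_BY.get(t, []):
--             counts[atk] = counts.get(atk, 0) + 1
--     best = max((counts.get(atk, 0) for atk in TYPE_BEATS), default=0)
--     return [atk for atk in TYPE_BEATS if best > 0 and counts.get(atk, 0) == best]
-- ===== Notes on version B (the rewrite author's own statement) =====
-- stated objective: alternative
-- what changed: Replaces A's per-attacker set-intersection argmax loop by a precomputed reverse index (defender type -> attackers beating it) and a counter incremented once per (own type, beating attacker) pair, then max over table keys and a filter; correct because the counter entry for an attacker equals the size of the intersection A computes.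
import Mathlib
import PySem

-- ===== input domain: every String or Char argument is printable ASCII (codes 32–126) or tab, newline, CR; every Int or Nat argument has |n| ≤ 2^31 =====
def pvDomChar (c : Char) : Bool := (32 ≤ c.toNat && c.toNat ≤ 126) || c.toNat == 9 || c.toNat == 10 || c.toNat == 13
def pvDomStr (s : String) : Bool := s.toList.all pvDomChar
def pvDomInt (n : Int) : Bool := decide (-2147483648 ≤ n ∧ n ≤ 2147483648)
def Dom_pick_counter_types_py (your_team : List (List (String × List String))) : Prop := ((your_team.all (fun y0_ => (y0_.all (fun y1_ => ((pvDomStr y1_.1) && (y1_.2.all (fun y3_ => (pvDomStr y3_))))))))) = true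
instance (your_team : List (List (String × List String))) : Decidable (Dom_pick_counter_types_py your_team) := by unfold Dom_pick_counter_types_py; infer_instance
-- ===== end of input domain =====

set_option maxRecDepth 4000


-- B replaces A's per-attacker set-intersection argmax by a reverse index (defender -> attackers that beat it)
-- and a counter incremented once per (own type, beating attacker) pair (alternative algorithm, same cost).

-- shared module constant TYPE_BEATS (a dict literal; items() order = insertion order)
def typeBeats : List (String × List String) :=
  [ ("fire", ["grass","ice","bug","steel"]),
    ("water", ["fire","ground","rock"]),
    ("grass", ["water","ground","rock"]),
    ("electric", ["water","flying"]),
    ("ice", ["grass","ground","flying","dragon"]),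
    ("fighting", ["normal","ice","rock","dark","steel"]),
    ("poison", ["grass","fairy"]),
    ("ground", ["fire","electric","poison","rock","steel"]),
    ("flying", ["grass","fighting","bug"]),
    ("psychic", ["fighting","poison"]),
    ("bug", ["grass","psychic","dark"]),
    ("rock", ["fire","ice","flying","bug"]),
    ("ghost", ["psychic","ghost"]),
    ("dragon", ["dragon"]),
    ("dark", ["psychic","ghost"]),
    ("steel", ["ice","rock","fairy"]),
    ("fairy", ["fighting","dragon","dark"]) ]

-- ===== PORT A =====
def pick_counter_types_py (your_team : List (List (String × List String))) : List String :=
  -- yours = set(); for e in your_team: for t in (e.get("types") or []): yours.add(t.lower())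
  let yours : PySem.Set String :=
    your_team.foldl (fun s e =>
      (((PySem.Dict.mk e).get? "types").getD []).foldl
        (fun s2 t => PySem.Set.add s2 (PySem.Str.lower t)) s) PySem.Set.empty
  -- best = []; best_score = 0; for atk, beats in TYPE_BEATS.items(): …
  let r : List String × Int :=
    typeBeats.foldl (fun st ab =>
      let score := PySem.Set.len (PySem.Set.inter yours (PySem.Set.ofList ab.2))
      if st.2 < score then ([ab.1], score)
      else if score = st.2 ∧ 0 < score then (st.1 ++ [ab.1], st.2)
      else st) ([], 0)
  -- return best or []
  if r.1.isEmpty then [] else r.1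

-- ===== PORT B =====
-- module-level reverse index: BEATEN_BY = {}; for atk, beats in TYPE_BEATS.items(): for d in beats: BEATEN_BY.setdefault(d, []).append(atk)
def beatenBy : PySem.Dict String (List String) :=
  typeBeats.foldl (fun d ab =>
    ab.2.foldl (fun d2 dfn => d2.modify dfn [] (· ++ [ab.1])) d) PySem.Dict.empty

def pick_counter_types_py_alt (your_team : List (List (String × List String))) : List String :=
  -- yours = {t.lower() for e in your_team for t in (e.get("types") or [])}
  let yours : PySem.Set String :=
    PySem.Set.ofList (your_team.flatMap (fun e =>
      (((PySem.Dict.mk e).get? "types").getD []).map PySem.Str.lower))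
  -- counts = {}; for t in yours: for atk in BEATEN_BY.get(t, []): counts[atk] = counts.get(atk, 0) + 1
  -- (the resulting dict does not depend on the set's iteration order: it is only looked up afterwards)
  let counts : PySem.Dict String Int :=
    yours.foldl (fun c t =>
      (beatenBy.getD t []).foldl (fun c2 atk => c2.insert atk (c2.getD atk 0 + 1)) c) PySem.Dict.empty
  -- best = max((counts.get(atk, 0) for atk in TYPE_BEATS), default=0)
  let best : Int := PySem.List.maxD (typeBeats.map (fun ab => counts.getD ab.1 0)) (fun x => x) 0
  -- [atk for atk in TYPE_BEATS if best > 0 and counts.get(atk, 0) == best]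
  (typeBeats.filter (fun ab => decide (0 < best) && decide (counts.getD ab.1 0 = best))).map (·.1)

-- ===== PRECONDITION & SPEC =====
def Spec_pick_counter_types_py (your_team : List (List (String × List String))) (out : List String) : Prop := out = pick_counter_types_py_alt your_team
instance (your_team : List (List (String × List String))) (out : List String) : Decidable (Spec_pick_counter_types_py your_team out) := by unfold Spec_pick_counter_types_py; infer_instance

-- ===== CLAIM (what is proved, stated in full; the proofs are below) =====
def Claim_equal_pick_counter_types_py : Prop := ∀ (your_team : List (List (String × List String))), Dom_pick_counter_types_py your_team → Spec_pick_counter_types_py your_team (pick_counter_types_py your_team)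

-- ===== LEMMAS AND PROOFS =====

-- A's nested add-loop over the team builds the same set as B's flattened comprehension.
theorem yours_eq (team : List (List (String × List String))) (s : PySem.Set String) :
    team.foldl (fun s e =>
      (((PySem.Dict.mk e).get? "types").getD []).foldl
        (fun s2 t => PySem.Set.add s2 (PySem.Str.lower t)) s) s
    = (team.flatMap (fun e =>
        (((PySem.Dict.mk e).get? "types").getD []).map PySem.Str.lower)).foldl PySem.Set.add s := by
  induction team generalizing s with
  | nil => rfl
  | cons e rest ih =>
      simp only [List.foldl_cons, List.flatMap_cons, List.foldl_append, ih, List.foldl_map]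

-- max(vs, default=0) equals the running max fold when the head is nonnegative.
theorem maxD_eq_foldl (v : Int) (t : List Int) (hv : 0 ≤ v) :
    PySem.List.maxD (v :: t) (fun x => x) 0 = (v :: t).foldl max 0 := by
  simp only [PySem.List.maxD, PySem.List.max?_id_cons, Option.getD_some, List.foldl_cons]
  rw [max_eq_right hv]

-- A's streaming argmax-with-ties loop over a nonnegative score list returns exactly
-- (the keys whose score equals the maximum and is positive, the maximum).
theorem stream_eq (l : List (String × Int)) (h : ∀ p ∈ l, 0 ≤ p.2) :
    l.foldl (fun st (p : String × Int) =>
      if st.2 < p.2 then ([p.1], p.2)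
      else if p.2 = st.2 ∧ 0 < p.2 then (st.1 ++ [p.1], st.2)
      else st) (([], 0) : List String × Int)
    = ((l.filter (fun p => decide (p.2 = (l.map (·.2)).foldl max 0) && decide (0 < p.2))).map Prod.fst,
       (l.map (·.2)).foldl max 0) := by
  induction l using List.reverseRecOn with
  | nil => rfl
  | append_singleton l p ih =>
      have hl : ∀ q ∈ l, 0 ≤ q.2 := fun q hq => h q (List.mem_append_left _ hq)
      have hp : 0 ≤ p.2 := h p (List.mem_append_right _ (List.mem_singleton_self _))
      have hmax := PySem.List.le_foldl_max (l.map (·.2)) 0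
      set M : Int := (l.map (·.2)).foldl max 0 with hM
      have hle : ∀ q ∈ l, q.2 ≤ M := fun q hq =>
        hmax.2 _ (List.mem_map_of_mem hq)
      have hM0 : 0 ≤ M := hmax.1
      rw [List.foldl_append, ih hl]
      simp only [List.foldl_cons, List.foldl_nil, List.map_append, List.map_cons, List.map_nil,
        List.filter_append, List.filter_cons, List.filter_nil]
      by_cases hgt : M < p.2
      · -- new strict maximum: old filter dies, p alone survives
        have hfilt : l.filter (fun q => decide (q.2 = M ⊔ p.2) && decide (0 < q.2)) = [] := by
          apply List.filter_eq_nil_iff.mpr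
          intro q hq
          have := hle q hq
          simp only [Bool.and_eq_true, decide_eq_true_eq, not_and]
          intro hqe
          rw [max_eq_right (le_of_lt hgt)] at hqe
          omega
        simp only [List.foldl_append, List.foldl_cons, List.foldl_nil]
        rw [if_pos hgt]
        have hposp : (0:Int) < p.2 := lt_of_le_of_lt hM0 hgt
        rw [show (l.map (·.2)).foldl max 0 ⊔ p.2 = p.2 from max_eq_right (le_of_lt hgt)] at hfilt ⊢
        simp [hfilt, hposp]
      · -- p.2 ≤ M: maximum unchanged
        have hle' : p.2 ≤ M := le_of_not_gt hgt
        have hmax' : ((l.map (·.2)).foldl max 0) ⊔ p.2 = M := by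
          rw [← hM]; exact max_eq_left hle'
        simp only [List.foldl_append, List.foldl_cons, List.foldl_nil]
        rw [← hM, hmax']
        rw [if_neg hgt]
        by_cases heq : p.2 = M ∧ 0 < p.2
        · rw [if_pos heq]
          have h0 : (0:Int) < M := heq.1 ▸ heq.2
          simp [heq.1, h0]
        · rw [if_neg heq]
          have : ¬ (decide (p.2 = M) && decide (0 < p.2)) = true := by
            simp only [Bool.and_eq_true, decide_eq_true_eq]
            exact heq
          simp [this]

-- scores in A are nonnegative (they are set lengths)
theorem score_nonneg (yours : PySem.Set String) (ab : String × List String) :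
    0 ≤ PySem.Set.len (PySem.Set.inter yours (PySem.Set.ofList ab.2)) := by
  simp [PySem.Set.len]

-- the flattened (defender, attacker) pair list of the table
def tbPairs : List (String × String) :=
  typeBeats.flatMap (fun ab => ab.2.map (fun d => (d, ab.1)))

-- B's nested reverse-index build equals the flat fold over the pair list.
theorem beatenBy_eq :
    beatenBy = tbPairs.foldl (fun d p => d.modify p.1 [] (· ++ [p.2])) PySem.Dict.empty := by
  show typeBeats.foldl _ _ = _
  rw [tbPairs]
  generalize PySem.Dict.empty = d
  induction typeBeats generalizing d with
  | nil => rfl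
  | cons ab rest ih =>
      simp only [List.foldl_cons, List.flatMap_cons, List.foldl_append, ih, List.foldl_map]

-- hence the lookup is the filtered pair list
theorem beatenBy_getD (t : String) :
    beatenBy.getD t [] = (tbPairs.filter (fun p => p.1 == t)).map (·.2) := by
  rw [beatenBy_eq, PySem.Dict.getD_foldl_modify_append]
  simp

-- generic: in a table with distinct keys and duplicate-free beat lists, the pair list
-- contains (t, a) exactly once if a's row contains t, else not at all.
theorem countP_pairs (tb : List (String × List String)) (a t : String) (bs : List String)
    (hnd : (tb.map Prod.fst).Nodup) (hbs : bs.Nodup) (h : (a, bs) ∈ tb) :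
    (tb.flatMap (fun ab => ab.2.map (fun d => (d, ab.1)))).countP
        (fun p => p.2 == a && p.1 == t)
      = if t ∈ bs then 1 else 0 := by
  induction tb with
  | nil => cases h
  | cons ab rest ih =>
      rw [List.flatMap_cons, List.countP_append, List.countP_map]
      simp only [List.map_cons, List.nodup_cons] at hnd
      rcases List.mem_cons.mp h with heq | hmem
      · -- this row is (a, bs)
        subst heq
        have hrest : (rest.flatMap (fun ab => ab.2.map (fun d => (d, ab.1)))).countP
            (fun p => p.2 == a && p.1 == t) = 0 := by
          rw [List.countP_eq_zero]
          intro p hp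
          obtain ⟨ab', hab', hp2⟩ := List.mem_flatMap.mp hp
          obtain ⟨d, _, rfl⟩ := List.mem_map.mp hp2
          have hmem' : ab'.1 ∈ rest.map Prod.fst := List.mem_map_of_mem hab'
          have : ab'.1 ≠ a := fun hc => hnd.1 (hc ▸ hmem')
          simp [this]
        rw [hrest]
        have : (List.countP ((fun p => p.2 == a && p.1 == t) ∘ fun d => (d, a)) bs)
            = List.count t bs := by
          rw [List.count_eq_countP]
          apply List.countP_congr
          intro d _
          simp
        rw [this]
        by_cases ht : t ∈ bs
        · simp [ht, List.count_eq_one_of_mem hbs ht]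
        · simp [ht, List.count_eq_zero_of_not_mem ht]
      · -- (a, bs) is further down; this row's key differs from a
        have hne : ab.1 ≠ a := fun hc =>
          hnd.1 (by
            rw [hc]
            exact List.mem_map_of_mem hmem)
        have hz : (List.countP ((fun p => p.2 == a && p.1 == t) ∘ fun d => (d, ab.1)) ab.2) = 0 := by
          rw [List.countP_eq_zero]
          intro d _
          simp [hne]
        rw [hz, ih hnd.2 hmem]
        simp

-- each attacker occurs in BEATEN_BY[t] exactly once when t is in its row, else not at all
theorem count_lookup (a t : String) (bs : List String) (h : (a, bs) ∈ typeBeats) :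
    List.count a (beatenBy.getD t []) = if t ∈ bs then 1 else 0 := by
  rw [beatenBy_getD, List.count_eq_countP, List.countP_map, List.countP_filter]
  exact countP_pairs typeBeats a t bs (by decide)
    (by
      have hall : typeBeats.all (fun ab => decide ab.2.Nodup) = true := by decide
      simpa using (List.all_eq_true.mp hall) _ h) h

-- B's nested counting loop equals the flat fold over the concatenated lookups
theorem counts_flatten (L : List String) (c : PySem.Dict String Int) :
    L.foldl (fun c t =>
      (beatenBy.getD t []).foldl (fun c2 atk => c2.insert atk (c2.getD atk 0 + 1)) c) c
    = (L.flatMap (fun t => beatenBy.getD t [])).foldl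
        (fun c2 atk => c2.insert atk (c2.getD atk 0 + 1)) c := by
  induction L generalizing c with
  | nil => rfl
  | cons t rest ih =>
      simp only [List.foldl_cons, List.flatMap_cons, List.foldl_append, ih]

-- a 0/1 sum is a countP
theorem sum_map_ite (L : List String) (p : String → Prop) [DecidablePred p] :
    (L.map (fun t => if p t then 1 else 0)).sum = L.countP (fun t => decide (p t)) := by
  induction L with
  | nil => rfl
  | cons t rest ih =>
      simp only [List.map_cons, List.sum_cons, List.countP_cons, ih]
      by_cases h : p t
      · simp [h, Nat.add_comm]
      · simp [h]

-- CRUX: the counter's entry for attacker a is the number of team types its row beats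
theorem counts_getD (L : List String) (a : String) (bs : List String)
    (h : (a, bs) ∈ typeBeats) :
    (L.foldl (fun c t =>
        (beatenBy.getD t []).foldl (fun c2 atk => c2.insert atk (c2.getD atk 0 + 1)) c)
      PySem.Dict.empty).getD a 0
    = ((L.countP (fun t => decide (t ∈ bs)) : Nat) : Int) := by
  rw [counts_flatten, PySem.Dict.getD_foldl_insert_add_one]
  rw [PySem.Dict.getD_empty, zero_add]
  congr 1
  rw [List.count_eq_countP, List.countP_flatMap]
  have hmap : (L.map (List.countP (fun x => x == a) ∘ fun t => beatenBy.getD t []))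
      = L.map (fun t => if t ∈ bs then 1 else 0) := by
    apply List.map_congr_left
    intro t _
    have := count_lookup a t bs h
    rwa [List.count_eq_countP] at this
  rw [hmap, sum_map_ite]

-- A's score is the same count
theorem len_inter (S bs : List String) :
    PySem.Set.len (PySem.Set.inter S (PySem.Set.ofList bs))
      = ((S.countP (fun t => decide (t ∈ bs)) : Nat) : Int) := by
  simp only [PySem.Set.len, PySem.Set.inter]
  congr 1
  rw [← List.countP_eq_length_filter]
  apply List.countP_congr
  intro t _
  simp [PySem.Set.mem_ofList]

-- ===== VERDICT (by name: the statement is the Claim_ definition above) =====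
theorem pick_counter_types_py_spec : Claim_equal_pick_counter_types_py := by
  intro your_team _
  show pick_counter_types_py your_team = pick_counter_types_py_alt your_team
  simp only [pick_counter_types_py, pick_counter_types_py_alt]
  rw [yours_eq]
  rw [show List.foldl PySem.Set.add PySem.Set.empty
        (your_team.flatMap (fun e =>
          (((PySem.Dict.mk e).get? "types").getD []).map PySem.Str.lower))
      = PySem.Set.ofList (your_team.flatMap (fun e =>
          (((PySem.Dict.mk e).get? "types").getD []).map PySem.Str.lower)) from rfl]
  set yours : PySem.Set String :=
    PySem.Set.ofList (your_team.flatMap (fun e =>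
      (((PySem.Dict.mk e).get? "types").getD []).map PySem.Str.lower)) with hy
  set counts : PySem.Dict String Int :=
    yours.foldl (fun c t =>
      (beatenBy.getD t []).foldl (fun c2 atk => c2.insert atk (c2.getD atk 0 + 1)) c)
      PySem.Dict.empty with hc
  set f : String × List String → String × Int :=
    fun ab => (ab.1, PySem.Set.len (PySem.Set.inter yours (PySem.Set.ofList ab.2))) with hf
  -- the counter agrees with A's score on every table row
  have hg : ∀ ab ∈ typeBeats, counts.getD ab.1 0 = (f ab).2 := by
    intro ab hab
    show counts.getD ab.1 0 = PySem.Set.len (PySem.Set.inter yours (PySem.Set.ofList ab.2))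
    rw [hc, counts_getD yours ab.1 ab.2 (by obtain ⟨a, b⟩ := ab; exact hab), len_inter]
  -- A's loop in filtered-max form
  have hfold :
      typeBeats.foldl (fun st ab =>
        let score := PySem.Set.len (PySem.Set.inter yours (PySem.Set.ofList ab.2))
        if st.2 < score then ([ab.1], score)
        else if score = st.2 ∧ 0 < score then (st.1 ++ [ab.1], st.2)
        else st) (([], 0) : List String × Int)
      = (typeBeats.map f).foldl (fun st (p : String × Int) =>
          if st.2 < p.2 then ([p.1], p.2)
          else if p.2 = st.2 ∧ 0 < p.2 then (st.1 ++ [p.1], st.2)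
          else st) ([], 0) := by
    rw [List.foldl_map]
  rw [hfold, stream_eq _ (by
    intro p hp
    obtain ⟨ab, _, rfl⟩ := List.mem_map.mp hp
    exact score_nonneg yours ab)]
  set M : Int := ((typeBeats.map f).map (·.2)).foldl max 0 with hM
  -- B's value list is A's score list
  have hmapg : typeBeats.map (fun ab => counts.getD ab.1 0) = (typeBeats.map f).map (·.2) := by
    rw [List.map_map]
    exact List.map_congr_left hg
  rw [hmapg]
  -- best = M
  have hvals : ((typeBeats.map f).map (·.2)) =
      PySem.Set.len (PySem.Set.inter yours (PySem.Set.ofList (typeBeats.headI.2)))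
        :: ((typeBeats.tail.map f).map (·.2)) := by
    simp [typeBeats, hf]
  rw [show PySem.List.maxD ((typeBeats.map f).map (·.2)) (fun x => x) 0 = M from by
    rw [hM, hvals, maxD_eq_foldl _ _ (by simp [PySem.Set.len]), ← hvals]]
  -- B's filter is A's filter
  have hfilt :
      (typeBeats.filter (fun ab => decide (0 < M) && decide (counts.getD ab.1 0 = M))).map (·.1)
      = ((typeBeats.map f).filter (fun p => decide (p.2 = M) && decide (0 < p.2))).map Prod.fst := by
    rw [List.filter_map, List.map_map]
    have hpred : ∀ ab ∈ typeBeats,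
        (decide (0 < M) && decide (counts.getD ab.1 0 = M))
          = ((fun p => decide (p.2 = M) && decide (0 < p.2)) ∘ f) ab := by
      intro ab hab
      simp only [Function.comp, hg ab hab]
      by_cases he : (f ab).2 = M
      · simp [he]
      · simp [he]
    rw [List.filter_congr hpred]
    rfl
  rw [hfilt]
  set FL := ((typeBeats.map f).filter
      (fun p => decide (p.2 = M) && decide (0 < p.2))).map Prod.fst with hFL
  by_cases hE : FL.isEmpty
  · rw [if_pos hE]
    exact (List.isEmpty_iff.mp hE).symm
  · rw [if_neg hE]
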